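-- pv_equiv track=rewrite | github.com/Panyouliang/00.Tools_v2 | 02.Genome_Anno_evaluate/new_addUTRs_pipe.py | cutUTR
-- ===== SOURCE A (Python) =====
-- def cutUTR(core_cds_loc,trans_exon_loc,core2rna_d):
--     UTR3,UTR5 = {},{}
--     for k,v in core_cds_loc.items():
--         tid,strand = k.split()[0],k.split()[1]
--         cds_max,cds_min = max(v),min(v)
--         if tid in core2rna_d.keys():
--             if strand == '+':
--                 UTR3[k] = [x for x in trans_exon_loc[core2rna_d[tid]] if x > cds_max]
--                 UTR5[k] = [x for x in trans_exon_loc[core2rna_d[tid]] if x < cds_min]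
--                 if len(UTR3[k]) %2 == 1:
--                     UTR3[k].append(cds_max+10)
--                 if len(UTR5[k]) %2 == 1:
--                     UTR5[k].append(cds_min-10)
--             elif strand == '-':
--                 UTR3[k] = [x for x in trans_exon_loc[core2rna_d[tid]] if x < cds_min]
--                 UTR5[k] = [x for x in trans_exon_loc[core2rna_d[tid]] if x > cds_max]
--                 if len(UTR3[k]) %2 == 1:
--                     UTR3[k].append(cds_min-10)
--                 if len(UTR5[k]) %2 == 1:
--                     UTR5[k].append(cds_max+10)
--
--     for k,v in UTR3.items():
--         v = v.sort()
--     for k,v in UTR5.items():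
--         v = v.sort()
--
--     return UTR3,UTR5
-- ===== SOURCE B (Python) =====
-- def _leading_below(ex, m):
--     # leading run of values < m in an ascending list
--     out = []
--     for x in ex:
--         if x >= m:
--             break
--         out.append(x)
--     return out
--
-- def _trailing_above(ex, m):
--     # trailing run of values > m in an ascending list
--     out = []
--     for x in reversed(ex):
--         if x <= m:
--             break
--         out.append(x)
--     out.reverse()
--     return out
--
-- def _insort(a, x):
--     # insert x into an ascending list, keeping it ascending
--     if not a or x < a[0]:
--         return [x] + a
--     return [a[0]] + _insort(a[1:], x)
--
-- def cutUTR(core_cds_loc, trans_exon_loc, core2rna_d):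
--     sorted_exons = {rid: sorted(xs) for rid, xs in trans_exon_loc.items()}
--     UTR3, UTR5 = {}, {}
--     for k, v in core_cds_loc.items():
--         fields = k.split()
--         tid, strand = fields[0], fields[1]
--         cds_max, cds_min = max(v), min(v)
--         if tid in core2rna_d and strand in ('+', '-'):
--             ex = sorted_exons[core2rna_d[tid]]
--             below = _leading_below(ex, cds_min)
--             above = _trailing_above(ex, cds_max)
--             if len(above) % 2 == 1:
--                 above = _insort(above, cds_max + 10)
--             if len(below) % 2 == 1:
--                 below = _insort(below, cds_min - 10)
--             if strand == '+':
--                 UTR3[k], UTR5[k] = above, below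
--             else:
--                 UTR3[k], UTR5[k] = below, above
--     return UTR3, UTR5
-- ===== Notes on version B (the rewrite author's own statement) =====
-- stated objective: alternative
-- what changed: B pre-sorts every exon list once into a dict, then for each transcript obtains the below-cds_min UTR as the leading run of the sorted list and the above-cds_max UTR as its trailing run (scan-until-boundary, no filtering), and pads an odd bucket by a recursive sorted insertion of the sentinel, so A's per-key filter-comprehensions and final dict-wide sort loops disappear.
-- outside the precondition, e.g. on cutUTR({'t1 +': []}, {}, {}): A raises ValueError, B raises ValueError; on cutUTR({'t1': [5]}, {}, {'t1': 'r'}): A raises IndexError, B raises IndexError; on cutUTR({'t1 +': [5]}, {}, {'t1': 'r'}): A raises KeyError, B raises KeyError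
import Mathlib
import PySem

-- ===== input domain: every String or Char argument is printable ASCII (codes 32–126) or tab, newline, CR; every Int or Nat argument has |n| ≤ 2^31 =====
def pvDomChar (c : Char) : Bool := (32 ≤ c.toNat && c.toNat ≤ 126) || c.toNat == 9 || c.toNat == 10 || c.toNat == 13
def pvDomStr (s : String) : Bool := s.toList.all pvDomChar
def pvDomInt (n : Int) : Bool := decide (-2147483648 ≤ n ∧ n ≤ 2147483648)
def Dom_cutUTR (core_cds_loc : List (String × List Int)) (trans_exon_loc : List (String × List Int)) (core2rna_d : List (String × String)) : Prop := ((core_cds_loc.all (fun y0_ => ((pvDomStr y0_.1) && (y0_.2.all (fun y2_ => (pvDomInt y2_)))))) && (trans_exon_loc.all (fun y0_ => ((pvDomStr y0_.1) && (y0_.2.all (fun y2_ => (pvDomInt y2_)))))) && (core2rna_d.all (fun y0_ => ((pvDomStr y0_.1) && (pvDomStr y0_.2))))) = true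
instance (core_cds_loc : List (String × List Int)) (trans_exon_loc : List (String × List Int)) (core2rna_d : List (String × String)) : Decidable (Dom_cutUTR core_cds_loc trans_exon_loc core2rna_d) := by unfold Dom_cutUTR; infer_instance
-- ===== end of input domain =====

-- B pre-sorts each exon list once, reads the UTR buckets as boundary runs of the sorted list and inserts sentinels in place; A filters twice per key and sorts every dict value at the end. Same values (objective: alternative).


-- ===== PORT A =====
-- 'for k,v in UTR3.items(): v.sort()': sort every value of a dict in place (also B's
-- '{rid: sorted(xs) for rid, xs in trans_exon_loc.items()}' — the same mapping over items)
def pvSortVals (d : PySem.Dict String (List Int)) : PySem.Dict String (List Int) :=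
  PySem.Dict.mk (d.items.map (fun q => (q.1, PySem.List.sorted q.2 (fun x => x) false)))

-- one iteration of A's main loop
def pvStepA (tex : PySem.Dict String (List Int)) (rd : PySem.Dict String String)
    (acc : PySem.Dict String (List Int) × PySem.Dict String (List Int)) (kv : String × List Int) :
    PySem.Dict String (List Int) × PySem.Dict String (List Int) :=
  let k := kv.1
  let v := kv.2
  let tid := PySem.List.pyGetD (PySem.Str.split₀ k) 0 ""          -- k.split()[0]; in range under Pre_
  let strand := PySem.List.pyGetD (PySem.Str.split₀ k) 1 ""       -- k.split()[1]; in range under Pre_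
  let cds_max := (PySem.List.max? v (fun x => x)).getD 0          -- max(v); v ≠ [] under Pre_
  let cds_min := (PySem.List.min? v (fun x => x)).getD 0          -- min(v); v ≠ [] under Pre_
  if rd.contains tid then
    if strand = "+" then
      let exons := tex.getD (rd.getD tid "") []                   -- trans_exon_loc[core2rna_d[tid]]; key present under Pre_
      let u3 := exons.filter (fun x => decide (x > cds_max))
      let u5 := exons.filter (fun x => decide (x < cds_min))
      let u3 := if u3.length % 2 = 1 then u3 ++ [cds_max + 10] else u3
      let u5 := if u5.length % 2 = 1 then u5 ++ [cds_min - 10] else u5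
      (acc.1.insert k u3, acc.2.insert k u5)
    else if strand = "-" then
      let exons := tex.getD (rd.getD tid "") []
      let u3 := exons.filter (fun x => decide (x < cds_min))
      let u5 := exons.filter (fun x => decide (x > cds_max))
      let u3 := if u3.length % 2 = 1 then u3 ++ [cds_min - 10] else u3
      let u5 := if u5.length % 2 = 1 then u5 ++ [cds_max + 10] else u5
      (acc.1.insert k u3, acc.2.insert k u5)
    else acc
  else acc

def cutUTR (core_cds_loc : List (String × List Int)) (trans_exon_loc : List (String × List Int)) (core2rna_d : List (String × String)) : (List (String × List Int)) × (List (String × List Int)) :=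
  let cds := PySem.Dict.ofList core_cds_loc
  let tex := PySem.Dict.ofList trans_exon_loc
  let rd := PySem.Dict.ofList core2rna_d
  let p := cds.items.foldl (pvStepA tex rd) (PySem.Dict.empty, PySem.Dict.empty)
  ((pvSortVals p.1).items, (pvSortVals p.2).items)

-- ===== PORT B =====
-- _leading_below: leading run of values < m in an ascending list (loop with break)
def pvLeadingBelow (ex : List Int) (m : Int) : List Int :=
  match ex with
  | [] => []
  | x :: t => if x ≥ m then [] else x :: pvLeadingBelow t m

-- _trailing_above: loop over reversed(ex) with break …
def pvTrailAux (l : List Int) (m : Int) : List Int :=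
  match l with
  | [] => []
  | x :: t => if x ≤ m then [] else x :: pvTrailAux t m

-- … then out.reverse()
def pvTrailingAbove (ex : List Int) (m : Int) : List Int :=
  (pvTrailAux ex.reverse m).reverse

-- _insort: recursive sorted insertion
def pvInsort (a : List Int) (x : Int) : List Int :=
  match a with
  | [] => [x]
  | y :: t => if x < y then x :: y :: t else y :: pvInsort t x

-- one iteration of B's main loop (sx = the pre-sorted exon dict)
def pvStepB (sx : PySem.Dict String (List Int)) (rd : PySem.Dict String String)
    (acc : PySem.Dict String (List Int) × PySem.Dict String (List Int)) (kv : String × List Int) :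
    PySem.Dict String (List Int) × PySem.Dict String (List Int) :=
  let k := kv.1
  let v := kv.2
  let fields := PySem.Str.split₀ k
  let tid := PySem.List.pyGetD fields 0 ""
  let strand := PySem.List.pyGetD fields 1 ""
  let cds_max := (PySem.List.max? v (fun x => x)).getD 0
  let cds_min := (PySem.List.min? v (fun x => x)).getD 0
  if rd.contains tid && (strand == "+" || strand == "-") then
    let ex := sx.getD (rd.getD tid "") []
    let below := pvLeadingBelow ex cds_min
    let above := pvTrailingAbove ex cds_max
    let above := if above.length % 2 = 1 then pvInsort above (cds_max + 10) else above
    let below := if below.length % 2 = 1 then pvInsort below (cds_min - 10) else below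
    if strand = "+" then (acc.1.insert k above, acc.2.insert k below)
    else (acc.1.insert k below, acc.2.insert k above)
  else acc

def cutUTR_alt (core_cds_loc : List (String × List Int)) (trans_exon_loc : List (String × List Int)) (core2rna_d : List (String × String)) : (List (String × List Int)) × (List (String × List Int)) :=
  let cds := PySem.Dict.ofList core_cds_loc
  let sx := pvSortVals (PySem.Dict.ofList trans_exon_loc)   -- the sorted_exons dict comprehension
  let rd := PySem.Dict.ofList core2rna_d
  let p := cds.items.foldl (pvStepB sx rd) (PySem.Dict.empty, PySem.Dict.empty)
  (p.1.items, p.2.items)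

-- ===== PRECONDITION & SPEC =====
-- Pre_ excludes exactly the inputs where the Python A raises: a CDS key with fewer than two
-- whitespace-separated tokens (IndexError), an empty CDS coordinate list (ValueError from max/min),
-- and a mapped transcript id whose image is not a key of trans_exon_loc (KeyError).
def Pre_cutUTR (core_cds_loc : List (String × List Int)) (trans_exon_loc : List (String × List Int)) (core2rna_d : List (String × String)) : Prop :=
  ∀ kv ∈ (PySem.Dict.ofList core_cds_loc).items,
    kv.2 ≠ [] ∧ 2 ≤ (PySem.Str.split₀ kv.1).length ∧
    (let tid := PySem.List.pyGetD (PySem.Str.split₀ kv.1) 0 ""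
     let strand := PySem.List.pyGetD (PySem.Str.split₀ kv.1) 1 ""
     (PySem.Dict.ofList core2rna_d).contains tid = true → (strand = "+" ∨ strand = "-") →
       (PySem.Dict.ofList trans_exon_loc).contains ((PySem.Dict.ofList core2rna_d).getD tid "") = true)
instance (core_cds_loc : List (String × List Int)) (trans_exon_loc : List (String × List Int)) (core2rna_d : List (String × String)) : Decidable (Pre_cutUTR core_cds_loc trans_exon_loc core2rna_d) := by unfold Pre_cutUTR; infer_instance

def pvWitness_cutUTR : (List (String × List Int)) × (List (String × List Int)) × (List (String × String)) :=
  ([("t1 +", [5, 10]), ("t2 -", [0, 8])], [("r1", [1, 3, 12, 20])], [("t1", "r1"), ("t2", "r1")])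

def Spec_cutUTR (core_cds_loc : List (String × List Int)) (trans_exon_loc : List (String × List Int)) (core2rna_d : List (String × String)) (out : (List (String × List Int)) × (List (String × List Int))) : Prop := out = cutUTR_alt core_cds_loc trans_exon_loc core2rna_d
instance (core_cds_loc : List (String × List Int)) (trans_exon_loc : List (String × List Int)) (core2rna_d : List (String × String)) (out : (List (String × List Int)) × (List (String × List Int))) : Decidable (Spec_cutUTR core_cds_loc trans_exon_loc core2rna_d out) := by unfold Spec_cutUTR; infer_instance

-- ===== CLAIM (what is proved, stated in full; the proofs are below) =====
def Claim_equal_cutUTR : Prop := ∀ (core_cds_loc : List (String × List Int)) (trans_exon_loc : List (String × List Int)) (core2rna_d : List (String × String)), Dom_cutUTR core_cds_loc trans_exon_loc core2rna_d → Pre_cutUTR core_cds_loc trans_exon_loc core2rna_d → Spec_cutUTR core_cds_loc trans_exon_loc core2rna_d (cutUTR core_cds_loc trans_exon_loc core2rna_d)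

-- ===== LEMMAS AND PROOFS =====
-- looking up the value-sorted dict = sorting the looked-up value
theorem pvGet?SortVals (l : List (String × List Int)) (k : String) :
    (PySem.Dict.mk (l.map (fun q => (q.1, PySem.List.sorted q.2 (fun x => x) false)))).get? k
      = ((PySem.Dict.mk l).get? k).map (fun v => PySem.List.sorted v (fun x => x) false) := by
  induction l with
  | nil => rfl
  | cons a t ih =>
    obtain ⟨ak, av⟩ := a
    simp only [List.map_cons, PySem.Dict.get?_mk_cons]
    by_cases h : ak == k
    · rw [if_pos h, if_pos h]; rfl
    · rw [if_neg h, if_neg h]; exact ih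

theorem pvSortVals_getD (d : PySem.Dict String (List Int)) (k : String) :
    (pvSortVals d).getD k [] = PySem.List.sorted (d.getD k []) (fun x => x) false := by
  cases d with
  | mk l =>
    rw [PySem.Dict.getD_eq_get?_getD, PySem.Dict.getD_eq_get?_getD]
    show ((PySem.Dict.mk (l.map _)).get? k).getD [] = _
    rw [pvGet?SortVals]
    cases (PySem.Dict.mk l).get? k <;> rfl

-- sorting commutes with filtering (identity key)
theorem pvSortedFilter (p : Int → Bool) (e : List Int) :
    PySem.List.sorted (e.filter p) (fun x => x) false
      = (PySem.List.sorted e (fun x => x) false).filter p := by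
  apply PySem.List.sorted_id_eq_of_perm_of_pairwise
  · exact (PySem.List.sorted_perm e (fun x => x) false).filter p
  · exact (PySem.List.sorted_pairwise e (fun x => x)).filter p

-- on an ascending list the leading run below m IS the filter below m
theorem pvLeadingBelow_eq (l : List Int) (m : Int) (h : l.Pairwise (· ≤ ·)) :
    pvLeadingBelow l m = l.filter (fun x => decide (x < m)) := by
  induction l with
  | nil => rfl
  | cons x t ih =>
    rcases List.pairwise_cons.mp h with ⟨hx, ht⟩
    show (if x ≥ m then [] else x :: pvLeadingBelow t m) = _
    rw [List.filter_cons]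
    by_cases hm : x ≥ m
    · rw [if_pos hm, if_neg (by simp; omega)]
      symm; rw [List.filter_eq_nil_iff]; intro y hy; have := hx y hy; simp; omega
    · rw [if_neg hm, if_pos (by simp; omega), ih ht]

-- on a descending list the leading run above m IS the filter above m
theorem pvTrailAux_eq (l : List Int) (m : Int) (h : l.Pairwise (fun a b => b ≤ a)) :
    pvTrailAux l m = l.filter (fun x => decide (x > m)) := by
  induction l with
  | nil => rfl
  | cons x t ih =>
    rcases List.pairwise_cons.mp h with ⟨hx, ht⟩
    show (if x ≤ m then [] else x :: pvTrailAux t m) = _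
    rw [List.filter_cons]
    by_cases hm : x ≤ m
    · rw [if_pos hm, if_neg (by simp; omega)]
      symm; rw [List.filter_eq_nil_iff]; intro y hy; have := hx y hy; simp; omega
    · rw [if_neg hm, if_pos (by simp; omega), ih ht]

-- on an ascending list the trailing run above m IS the filter above m
theorem pvTrailingAbove_eq (l : List Int) (m : Int) (h : l.Pairwise (· ≤ ·)) :
    pvTrailingAbove l m = l.filter (fun x => decide (x > m)) := by
  unfold pvTrailingAbove
  rw [pvTrailAux_eq _ _ (List.pairwise_reverse.mpr (by simpa using h)),
      List.filter_reverse, List.reverse_reverse]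

theorem pvInsort_perm (a : List Int) (x : Int) : (pvInsort a x).Perm (x :: a) := by
  induction a with
  | nil => rfl
  | cons y t ih =>
    show (if x < y then x :: y :: t else y :: pvInsort t x).Perm _
    by_cases h : x < y
    · rw [if_pos h]
    · rw [if_neg h]; exact (ih.cons y).trans (List.Perm.swap x y t)

theorem pvInsort_pairwise (a : List Int) (x : Int) (h : a.Pairwise (· ≤ ·)) :
    (pvInsort a x).Pairwise (· ≤ ·) := by
  induction a with
  | nil => simp [pvInsort]
  | cons y t ih =>
    rcases List.pairwise_cons.mp h with ⟨hy, ht⟩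
    show List.Pairwise _ (if x < y then x :: y :: t else y :: pvInsort t x)
    by_cases hx : x < y
    · rw [if_pos hx]
      refine List.pairwise_cons.mpr ⟨?_, h⟩
      intro z hz
      rcases List.mem_cons.mp hz with rfl | hz
      · omega
      · have := hy z hz; omega
    · rw [if_neg hx]
      refine List.pairwise_cons.mpr ⟨?_, ih ht⟩
      intro z hz
      rcases List.mem_cons.mp ((pvInsort_perm t x).mem_iff.mp hz) with rfl | hz
      · omega
      · exact hy z hz

-- appending then sorting = inserting into the sorted list
theorem pvInsort_sorted (u : List Int) (x : Int) :
    PySem.List.sorted (u ++ [x]) (fun y => y) false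
      = pvInsort (PySem.List.sorted u (fun y => y) false) x := by
  apply PySem.List.sorted_id_eq_of_perm_of_pairwise
  · exact ((pvInsort_perm _ x).trans
      ((PySem.List.sorted_perm u (fun y => y) false).cons x)).trans
      (List.perm_append_singleton x u).symm
  · exact pvInsort_pairwise _ x (PySem.List.sorted_pairwise u (fun y => y))

-- the sorted image of one of A's padded buckets is the corresponding B bucket
theorem pvBucketEq (e : List Int) (p : Int → Bool) (s : Int) :
    PySem.List.sorted
        (if (e.filter p).length % 2 = 1 then e.filter p ++ [s] else e.filter p)
        (fun x => x) false
      = (if ((PySem.List.sorted e (fun x => x) false).filter p).length % 2 = 1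
          then pvInsort ((PySem.List.sorted e (fun x => x) false).filter p) s
          else (PySem.List.sorted e (fun x => x) false).filter p) := by
  have hlen : ((PySem.List.sorted e (fun x => x) false).filter p).length = (e.filter p).length := by
    rw [← pvSortedFilter]
    exact PySem.List.length_sorted (e.filter p) (fun x => x) false
  by_cases hpar : (e.filter p).length % 2 = 1
  · rw [if_pos hpar, if_pos (by omega), pvInsort_sorted, pvSortedFilter]
  · rw [if_neg hpar, if_neg (by omega), pvSortedFilter]

theorem pvSortVals_contains (d : PySem.Dict String (List Int)) (k : String) :
    (pvSortVals d).contains k = d.contains k := by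
  cases d with
  | mk l => simp [pvSortVals, PySem.Dict.contains_mk, List.any_map, Function.comp_def]

theorem pvSortVals_insert (d : PySem.Dict String (List Int)) (k : String) (x : List Int) :
    pvSortVals (d.insert k x) = (pvSortVals d).insert k (PySem.List.sorted x (fun y => y) false) := by
  apply PySem.Dict.ext
  show ((d.insert k x).items.map (fun q => (q.1, PySem.List.sorted q.2 (fun y => y) false)))
      = ((pvSortVals d).insert k (PySem.List.sorted x (fun y => y) false)).items
  by_cases h : d.contains k = true
  · rw [PySem.Dict.items_insert_of_contains d x h,
        PySem.Dict.items_insert_of_contains (pvSortVals d) _ (by rw [pvSortVals_contains]; exact h)]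
    show _ = (d.items.map (fun q => (q.1, PySem.List.sorted q.2 (fun y => y) false))).map _
    simp only [List.map_map]
    apply List.map_congr_left
    intro p _
    by_cases hp : p.1 = k <;> simp [hp]
  · have h' : d.contains k = false := by simpa using h
    rw [PySem.Dict.items_insert_of_not_contains d x h',
        PySem.Dict.items_insert_of_not_contains (pvSortVals d) _ (by rw [pvSortVals_contains]; exact h')]
    simp [pvSortVals]

-- one step of A's loop, with sorted values, is one step of B's loop
theorem pvStepEq (tex : PySem.Dict String (List Int)) (rd : PySem.Dict String String)
    (acc : PySem.Dict String (List Int) × PySem.Dict String (List Int)) (kv : String × List Int) :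
    (fun p : PySem.Dict String (List Int) × PySem.Dict String (List Int) =>
        (pvSortVals p.1, pvSortVals p.2)) (pvStepA tex rd acc kv)
    = pvStepB (pvSortVals tex) rd (pvSortVals acc.1, pvSortVals acc.2) kv := by
  obtain ⟨k, v⟩ := kv
  have hpair := fun m =>
    PySem.List.sorted_pairwise (tex.getD (rd.getD (PySem.List.pyGetD (PySem.Str.split₀ k) 0 "") "") m) (fun x : Int => x)
  by_cases hc : rd.contains (PySem.List.pyGetD (PySem.Str.split₀ k) 0 "") = true
  · by_cases hp : PySem.List.pyGetD (PySem.Str.split₀ k) 1 "" = "+"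
    · simp only [pvStepA, pvStepB, hc, hp, pvSortVals_getD,
        pvLeadingBelow_eq _ _ (hpair []), pvTrailingAbove_eq _ _ (hpair []),
        ← pvBucketEq]
      exact Prod.ext (pvSortVals_insert _ _ _) (pvSortVals_insert _ _ _)
    · by_cases hm : PySem.List.pyGetD (PySem.Str.split₀ k) 1 "" = "-"
      · simp only [pvStepA, pvStepB, hc, hm, pvSortVals_getD,
          pvLeadingBelow_eq _ _ (hpair []), pvTrailingAbove_eq _ _ (hpair []),
          ← pvBucketEq]
        simp only [reduceIte]
        exact Prod.ext (pvSortVals_insert _ _ _) (pvSortVals_insert _ _ _)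
      · simp [pvStepA, pvStepB, hc, hp, hm]
  · simp [pvStepA, pvStepB, hc]

-- A's whole loop followed by A's value-sorting loops equals B's whole loop
theorem pvFoldEq (tex : PySem.Dict String (List Int)) (rd : PySem.Dict String String)
    (l : List (String × List Int))
    (acc : PySem.Dict String (List Int) × PySem.Dict String (List Int)) :
    (fun p : PySem.Dict String (List Int) × PySem.Dict String (List Int) =>
        (pvSortVals p.1, pvSortVals p.2))
      (l.foldl (pvStepA tex rd) acc)
    = l.foldl (pvStepB (pvSortVals tex) rd) (pvSortVals acc.1, pvSortVals acc.2) := by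
  induction l generalizing acc with
  | nil => rfl
  | cons kv t ih =>
    rw [List.foldl_cons, List.foldl_cons]
    exact (ih _).trans (congrArg (t.foldl _) (pvStepEq tex rd acc kv))

-- ===== VERDICT (by name: the statement is the Claim_ definition above) =====
theorem cutUTR_spec : Claim_equal_cutUTR := by
  intro core_cds_loc trans_exon_loc core2rna_d _ _
  unfold Spec_cutUTR
  exact congrArg
    (fun p : PySem.Dict String (List Int) × PySem.Dict String (List Int) => (p.1.items, p.2.items))
    (pvFoldEq (PySem.Dict.ofList trans_exon_loc) (PySem.Dict.ofList core2rna_d)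
      (PySem.Dict.ofList core_cds_loc).items (PySem.Dict.empty, PySem.Dict.empty))
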